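-- pv_equiv track=rewrite | github.com/wolfthewizard/jftt_language_compiler | LangTranslator.py | __generate_constant
-- ===== SOURCE A (Python) =====
-- def __generate_constant(value, register="a"):
--     commands = []
--     while value:
--         if value % 2:
--             commands.append("INC " + register)
--             value -= 1
--         else:
--             commands.append("SHL " + register)
--             value //= 2
--     commands.append("RESET " + register)
--     return "\n".join(commands[::-1])
-- ===== SOURCE B (Python) =====
-- def __generate_constant(value, register="a"):
--     # MSB-first: RESET, INC for the leading bit, then SHL (+INC on 1-bits) per remaining bit.
--     if value == 0:
--         return "RESET " + register
--     bits = bin(value)[2:]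
--     lines = ["RESET " + register, "INC " + register]
--     for b in bits[1:]:
--         lines.append("SHL " + register)
--         if b == '1':
--             lines.append("INC " + register)
--     return "\n".join(lines)
-- ===== Notes on version B (the rewrite author's own statement) =====
-- stated objective: simpler
-- what changed: B walks the binary digits most-significant-first and emits commands directly in final order (no LSB-first accumulation, no list reversal); Pre_ excludes negative values, on which A loops forever.
import Mathlib
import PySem

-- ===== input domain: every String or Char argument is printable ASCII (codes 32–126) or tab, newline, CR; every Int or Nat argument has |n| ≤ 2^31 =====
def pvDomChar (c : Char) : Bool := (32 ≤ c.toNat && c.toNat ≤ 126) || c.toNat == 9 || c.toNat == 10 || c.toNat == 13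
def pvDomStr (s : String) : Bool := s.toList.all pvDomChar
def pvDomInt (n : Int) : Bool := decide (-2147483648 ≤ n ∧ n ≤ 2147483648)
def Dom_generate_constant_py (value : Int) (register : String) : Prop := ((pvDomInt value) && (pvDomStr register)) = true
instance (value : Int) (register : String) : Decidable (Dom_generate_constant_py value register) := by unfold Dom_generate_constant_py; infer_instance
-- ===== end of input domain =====

-- B emits the constant-building commands MSB-first in final order (no reversal); objective: simpler.
-- Pre_ excludes negative values: on them Python A never terminates (the loop alternates odd/even forever).


-- ===== PORT A =====
-- the while loop of A, on the admitted domain 0 ≤ value (value.toNat);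
-- on negatives Python A diverges, which Pre_ excludes.
def pyGenLoop (v : Nat) (register : String) (acc : List String) : List String :=
  if _h : v = 0 then acc
  else if v % 2 = 1 then pyGenLoop (v - 1) register (acc ++ ["INC " ++ register])
  else pyGenLoop (v / 2) register (acc ++ ["SHL " ++ register])
termination_by v
decreasing_by all_goals omega

def generate_constant_py (value : Int) (register : String) : String :=
  -- commands = loop result; commands.append("RESET "+register); "\n".join(commands[::-1])
  PySem.Str.join "\n" ((pyGenLoop value.toNat register [] ++ ["RESET " ++ register]).reverse)

-- ===== PORT B =====
-- bin(value)[2:] for value > 0: binary digits, most significant first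
def binDigits (n : Nat) : List Char :=
  if _h : n = 0 then []
  else binDigits (n / 2) ++ [if n % 2 = 1 then '1' else '0']
termination_by n
decreasing_by omega

def generate_constant_py_alt (value : Int) (register : String) : String :=
  if value = 0 then "RESET " ++ register
  else
    PySem.Str.join "\n"
      ((binDigits value.toNat).tail.foldl
        (fun acc b =>
          let acc := acc ++ ["SHL " ++ register]
          if b = '1' then acc ++ ["INC " ++ register] else acc)
        ["RESET " ++ register, "INC " ++ register])

-- ===== PRECONDITION & SPEC =====
-- Pre_ excludes exactly the negative values, on which Python A loops forever.
def Pre_generate_constant_py (value : Int) (register : String) : Prop := 0 ≤ value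
instance (value : Int) (register : String) : Decidable (Pre_generate_constant_py value register) := by unfold Pre_generate_constant_py; infer_instance
def pvWitness_generate_constant_py : Int × String := (6, "a")

def Spec_generate_constant_py (value : Int) (register : String) (out : String) : Prop := out = generate_constant_py_alt value register
instance (value : Int) (register : String) (out : String) : Decidable (Spec_generate_constant_py value register out) := by unfold Spec_generate_constant_py; infer_instance

-- ===== CLAIM (what is proved, stated in full; the proofs are below) =====
def Claim_equal_generate_constant_py : Prop := ∀ (value : Int) (register : String), Dom_generate_constant_py value register → Pre_generate_constant_py value register → Spec_generate_constant_py value register (generate_constant_py value register)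

-- ===== LEMMAS AND PROOFS =====

-- commands emitted for the digits after the leading one, MSB-first
def tailCmds (register : String) (bits : List Char) : List String :=
  bits.flatMap (fun b => ("SHL " ++ register) :: if b = '1' then ["INC " ++ register] else [])

theorem pyGenLoop_acc (v : Nat) (r : String) (acc : List String) :
    pyGenLoop v r acc = acc ++ pyGenLoop v r [] := by
  induction v using Nat.strong_induction_on generalizing acc with
  | _ v ih =>
    conv_lhs => rw [pyGenLoop]
    conv_rhs => rw [pyGenLoop]
    by_cases h0 : v = 0
    · simp [h0]
    · by_cases h1 : v % 2 = 1
      · simp only [h0, dif_neg, not_false_iff, h1, if_pos]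
        rw [ih (v - 1) (by omega)]
        simp only [List.nil_append]
        rw [ih (v - 1) (by omega) ([("INC " ++ r)])]
        simp
      · simp only [h0, dif_neg, not_false_iff, h1, if_neg]
        rw [ih (v / 2) (by omega)]
        simp only [List.nil_append]
        rw [ih (v / 2) (by omega) ([("SHL " ++ r)])]
        simp

theorem binDigits_ne_nil (n : Nat) (h : n ≠ 0) : binDigits n ≠ [] := by
  rw [binDigits]; simp [h]

theorem reverse_pyGenLoop (v : Nat) (r : String) (hv : v ≠ 0) :
    (pyGenLoop v r []).reverse = ("INC " ++ r) :: tailCmds r (binDigits v).tail := by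
  induction v using Nat.strong_induction_on with
  | _ v ih =>
    by_cases h1 : v % 2 = 1
    · by_cases hone : v = 1
      · subst hone
        have e1 : pyGenLoop 1 r [] = ["INC " ++ r] := by
          rw [pyGenLoop]; norm_num; rw [pyGenLoop]; simp
        have e2 : binDigits 1 = ['1'] := by
          rw [binDigits]; norm_num; rw [binDigits]; simp
        rw [e1, e2]; simp [tailCmds]
      · -- v odd, v ≥ 3: one INC step then one SHL step, then recurse at v / 2
        have hv2 : v / 2 ≠ 0 := by omega
        conv_lhs => rw [pyGenLoop]
        simp only [hv, dif_neg, not_false_iff, h1, if_pos]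
        rw [pyGenLoop_acc, List.nil_append]
        conv_lhs => rw [pyGenLoop]
        have hv1 : ¬ (v - 1 = 0) := by omega
        have he : ¬ ((v - 1) % 2 = 1) := by omega
        simp only [hv1, dif_neg, not_false_iff, he, if_neg]
        rw [pyGenLoop_acc, List.nil_append]
        have hq : (v - 1) / 2 = v / 2 := by omega
        rw [hq, List.reverse_append, List.reverse_append, ih (v / 2) (by omega) hv2]
        conv_rhs => rw [binDigits]
        simp only [hv, dif_neg, not_false_iff, h1, if_pos]
        rw [List.tail_append_of_ne_nil (binDigits_ne_nil _ hv2)]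
        simp [tailCmds]
    · have hv2 : v / 2 ≠ 0 := by omega
      conv_lhs => rw [pyGenLoop]
      simp only [hv, dif_neg, not_false_iff, h1, if_neg]
      rw [pyGenLoop_acc, List.nil_append, List.reverse_append, ih (v / 2) (by omega) hv2]
      conv_rhs => rw [binDigits]
      simp only [hv, dif_neg, not_false_iff, h1, if_neg]
      rw [List.tail_append_of_ne_nil (binDigits_ne_nil _ hv2)]
      simp [tailCmds]

theorem foldB (r : String) (bits : List Char) (acc : List String) :
    bits.foldl
      (fun acc b =>
        let acc := acc ++ ["SHL " ++ r]
        if b = '1' then acc ++ ["INC " ++ r] else acc)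
      acc = acc ++ tailCmds r bits := by
  induction bits generalizing acc with
  | nil => simp [tailCmds]
  | cons b bs ih =>
    simp only [List.foldl_cons, ih, tailCmds, List.flatMap_cons]
    by_cases hb : b = '1' <;> simp [hb]

-- ===== VERDICT (by name: the statement is the Claim_ definition above) =====
theorem generate_constant_py_spec : Claim_equal_generate_constant_py := by
  intro value register _ hpre
  unfold Spec_generate_constant_py generate_constant_py generate_constant_py_alt
  by_cases h0 : value = 0
  · subst h0
    have e : pyGenLoop ((0 : Int).toNat) register [] = [] := by rw [pyGenLoop]; norm_num
    rw [if_pos rfl, e]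
    simp [PySem.Str.join, ← String.toList_inj]
  · have hn : value.toNat ≠ 0 := by
      unfold Pre_generate_constant_py at hpre; omega
    rw [if_neg h0, foldB, List.reverse_append, reverse_pyGenLoop _ _ hn]
    simp
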